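-- pv_equiv track=rewrite | github.com/MrBrantCode/unitest_baseline | mut_generate/mist_train_cf/cf_86814/solution.py | find_second_highest_odd_recursive
-- ===== SOURCE A (Python) =====
-- def find_second_highest_odd_recursive(arr, highest, second_highest):
--     if len(arr) == 0:
--         return second_highest
--
--     num = arr.pop()
--
--     if num % 2 != 0:
--         if num > highest:
--             second_highest = highest
--             highest = num
--         elif num > second_highest and num != highest:
--             second_highest = num
--
--     return find_second_highest_odd_recursive(arr, highest, second_highest)
-- ===== SOURCE B (Python) =====
-- def find_second_highest_odd_recursive(arr, highest, second_highest):
--     # iterative while-pop loop instead of recursion; same reverse order,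
--     # same in-place emptying of arr as the recursive original
--     while len(arr) != 0:
--         num = arr.pop()
--         if num % 2 != 0:
--             if num > highest:
--                 second_highest = highest
--                 highest = num
--             elif num > second_highest and num != highest:
--                 second_highest = num
--     return second_highest
-- ===== Notes on version B (the rewrite author's own statement) =====
-- stated objective: simpler
-- what changed: Replaces the tail recursion (one Python frame per element, RecursionError on long lists) with a plain while/pop loop over the same reverse order and update branches.
import Mathlib
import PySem

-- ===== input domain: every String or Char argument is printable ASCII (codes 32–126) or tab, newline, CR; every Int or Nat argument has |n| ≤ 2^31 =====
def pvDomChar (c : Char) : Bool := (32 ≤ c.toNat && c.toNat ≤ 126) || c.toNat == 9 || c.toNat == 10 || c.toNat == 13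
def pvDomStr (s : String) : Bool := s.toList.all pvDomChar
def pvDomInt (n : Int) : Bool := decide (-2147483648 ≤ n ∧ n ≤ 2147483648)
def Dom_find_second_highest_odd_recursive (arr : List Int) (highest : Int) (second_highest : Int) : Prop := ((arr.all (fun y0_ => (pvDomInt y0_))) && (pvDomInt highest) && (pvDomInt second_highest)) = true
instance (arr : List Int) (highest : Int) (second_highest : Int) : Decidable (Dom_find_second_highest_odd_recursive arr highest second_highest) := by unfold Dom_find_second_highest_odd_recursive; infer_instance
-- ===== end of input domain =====

-- B replaces A's tail recursion with a while/pop loop (same reverse order, same updates);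
-- objective: simpler (no recursion depth). Both A and B empty arr in place in Python;
-- the equivalence proved here is about the return value.


-- ===== PORT A =====
-- literal port of the recursion: pop the last element, update, recurse on the rest
def find_second_highest_odd_recursive (arr : List Int) (highest : Int) (second_highest : Int) : Int :=
  match harr : arr.getLast? with
  | none => second_highest
  | some num =>
    let rest := arr.dropLast
    if PySem.Int.mod num 2 ≠ 0 then
      if num > highest then
        find_second_highest_odd_recursive rest num highest
      else if num > second_highest ∧ num ≠ highest then
        find_second_highest_odd_recursive rest highest num
      else
        find_second_highest_odd_recursive rest highest second_highest
    else
      find_second_highest_odd_recursive rest highest second_highest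
termination_by arr.length
decreasing_by
  all_goals
    cases arr with
    | nil => simp at harr
    | cons a l => simp [List.length_dropLast]

-- ===== PORT B =====
-- the while/pop loop of Source B: fold the same update step over the elements in pop (reverse) order
def pvStep_find_second_highest_odd_recursive (st : Int × Int) (num : Int) : Int × Int :=
  if PySem.Int.mod num 2 ≠ 0 then
    if num > st.1 then (num, st.1)
    else if num > st.2 ∧ num ≠ st.1 then (st.1, num)
    else st
  else st

def find_second_highest_odd_recursive_alt (arr : List Int) (highest : Int) (second_highest : Int) : Int :=
  (arr.reverse.foldl pvStep_find_second_highest_odd_recursive (highest, second_highest)).2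

-- ===== PRECONDITION & SPEC =====
def Spec_find_second_highest_odd_recursive (arr : List Int) (highest : Int) (second_highest : Int) (out : Int) : Prop := out = find_second_highest_odd_recursive_alt arr highest second_highest
instance (arr : List Int) (highest : Int) (second_highest : Int) (out : Int) : Decidable (Spec_find_second_highest_odd_recursive arr highest second_highest out) := by unfold Spec_find_second_highest_odd_recursive; infer_instance

-- ===== CLAIM (what is proved, stated in full; the proofs are below) =====
def Claim_equal_find_second_highest_odd_recursive : Prop := ∀ (arr : List Int) (highest : Int) (second_highest : Int), Dom_find_second_highest_odd_recursive arr highest second_highest → Spec_find_second_highest_odd_recursive arr highest second_highest (find_second_highest_odd_recursive arr highest second_highest)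

-- ===== LEMMAS AND PROOFS =====
theorem pv_key (arr : List Int) : ∀ (h s : Int),
    find_second_highest_odd_recursive arr h s
      = (arr.reverse.foldl pvStep_find_second_highest_odd_recursive (h, s)).2 := by
  induction arr using List.reverseRecOn with
  | nil =>
    intro h s
    simp [find_second_highest_odd_recursive]
  | append_singleton l x ih =>
    intro h s
    rw [show (l ++ [x]).reverse = x :: l.reverse by simp, List.foldl_cons,
      find_second_highest_odd_recursive]
    split
    · simp_all
    · rename_i num harr
      rw [List.getLast?_concat, Option.some.injEq] at harr
      subst harr
      simp only [List.dropLast_concat]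
      split_ifs with h1 h2 h3 <;>
      · rw [ih]
        congr 1
        simp only [pvStep_find_second_highest_odd_recursive]
        split_ifs
        all_goals simp_all

-- ===== VERDICT (by name: the statement is the Claim_ definition above) =====
theorem find_second_highest_odd_recursive_spec : Claim_equal_find_second_highest_odd_recursive := by
  intro arr h s _
  unfold Spec_find_second_highest_odd_recursive find_second_highest_odd_recursive_alt
  exact pv_key arr h s
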